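-- pv_equiv track=rewrite | github.com/bjarkis21/einstaklingsverkefni_4 | daemi_4b.py | get_answer_set
-- ===== SOURCE A (Python) =====
-- LETTERS = "abcdefghij"
--
-- SPECIALS = "!#$%&*"
--
-- NUMBERS = "012"
--
-- def get_answer_set(all_set):
--     '''Iterates through all_set and returns only words that contain character AND special AND number'''
--
--     answer_set = set()
--     for word in all_set:
--         has_letter = False
--         has_special = False
--         has_number = False
--         for char in word:
--             if char in LETTERS:
--                 has_letter = True
--             elif char in SPECIALS:
--                 has_special = True
--             elif char in NUMBERS:
--                 has_number = True
--         if (has_letter == True) and (has_special == True) and (has_number == True):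
--             answer_set.add(word)
--
--     return answer_set
-- ===== SOURCE B (Python) =====
-- LETTERS = "abcdefghij"
--
-- SPECIALS = "!#$%&*"
--
-- NUMBERS = "012"
--
-- def get_answer_set(all_set):
--     '''Iterates through all_set and returns only words that contain character AND special AND number'''
--     return {word for word in all_set
--             if any(c in LETTERS for c in word)
--             and any(c in SPECIALS for c in word)
--             and any(c in NUMBERS for c in word)}
-- ===== Notes on version B (the rewrite author's own statement) =====
-- stated objective: idiomatic
-- what changed: Replaces the flag-setting elif loop plus conditional set.add with a set comprehension using three independent short-circuiting any() membership passes per word.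
import Mathlib
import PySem

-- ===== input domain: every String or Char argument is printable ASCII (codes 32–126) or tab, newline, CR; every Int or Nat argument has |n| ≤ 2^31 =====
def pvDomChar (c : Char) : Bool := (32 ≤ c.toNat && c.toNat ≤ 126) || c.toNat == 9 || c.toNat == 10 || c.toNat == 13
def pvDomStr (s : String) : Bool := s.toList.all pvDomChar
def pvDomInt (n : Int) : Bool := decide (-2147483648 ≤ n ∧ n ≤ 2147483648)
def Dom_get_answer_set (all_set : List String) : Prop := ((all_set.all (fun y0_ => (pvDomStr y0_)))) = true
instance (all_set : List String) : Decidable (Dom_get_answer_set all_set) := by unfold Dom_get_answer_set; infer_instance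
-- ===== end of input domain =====

-- B replaces A's single flag-setting elif loop with three independent any() membership
-- passes inside a set comprehension (idiomatic; same cost).

def pvLETTERS : List Char := "abcdefghij".toList
def pvSPECIALS : List Char := "!#$%&*".toList
def pvNUMBERS : List Char := "012".toList

-- ===== PORT A =====
-- inner loop: one pass over the word's characters, keeping the three flags
def pvFlagsLoop (word : List Char) : Bool × Bool × Bool :=
  word.foldl (fun f c =>
    if PySem.Chars.isIn [c] pvLETTERS then (true, f.2.1, f.2.2)
    else if PySem.Chars.isIn [c] pvSPECIALS then (f.1, true, f.2.2)
    else if PySem.Chars.isIn [c] pvNUMBERS then (f.1, f.2.1, true)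
    else f) (false, false, false)

def get_answer_set (all_set : List String) : List String :=
  all_set.foldl (fun answer_set word =>
    let f := pvFlagsLoop word.toList
    if f.1 = true ∧ f.2.1 = true ∧ f.2.2 = true then PySem.Set.add answer_set word
    else answer_set) PySem.Set.empty

-- ===== PORT B =====
def get_answer_set_alt (all_set : List String) : List String :=
  PySem.Set.ofList (all_set.filter (fun word =>
    word.toList.any (fun c => PySem.Chars.isIn [c] pvLETTERS) &&
    word.toList.any (fun c => PySem.Chars.isIn [c] pvSPECIALS) &&
    word.toList.any (fun c => PySem.Chars.isIn [c] pvNUMBERS)))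

-- ===== PRECONDITION & SPEC =====
def Spec_get_answer_set (all_set : List String) (out : List String) : Prop := out = get_answer_set_alt all_set
instance (all_set : List String) (out : List String) : Decidable (Spec_get_answer_set all_set out) := by unfold Spec_get_answer_set; infer_instance

-- ===== CLAIM (what is proved, stated in full; the proofs are below) =====
def Claim_equal_get_answer_set : Prop := ∀ (all_set : List String), Dom_get_answer_set all_set → Spec_get_answer_set all_set (get_answer_set all_set)

-- ===== LEMMAS AND PROOFS =====

-- single-char 'c in s' is list membership
theorem isIn_singleton (c : Char) (s : List Char) :
    PySem.Chars.isIn [c] s = s.contains c := by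
  rcases h : PySem.Chars.isIn [c] s with _ | _
  · have hni := (PySem.Chars.isIn_iff_infix [c] s).trans (List.singleton_infix_iff c s)
    rw [h] at hni
    have hm : c ∉ s := fun hc => absurd (hni.mpr hc) (by simp)
    simp [hm]
  · have hm : c ∈ s :=
      (List.singleton_infix_iff c s).mp ((PySem.Chars.isIn_iff_infix [c] s).mp h)
    simp [hm]

-- the flag-setting elif loop over disjoint character classes computes three any's
theorem flag3_loop (pL pS pN : Char → Bool)
    (hdis : ∀ c, (pL c = true → pS c = false ∧ pN c = false) ∧ (pS c = true → pN c = false))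
    (word : List Char) (f : Bool × Bool × Bool) :
    word.foldl (fun f c =>
      if pL c then (true, f.2.1, f.2.2)
      else if pS c then (f.1, true, f.2.2)
      else if pN c then (f.1, f.2.1, true)
      else f) f
    = (f.1 || word.any pL, f.2.1 || word.any pS, f.2.2 || word.any pN) := by
  induction word generalizing f with
  | nil => simp
  | cons c cs ih =>
    obtain ⟨a, b, d⟩ := f
    simp only [List.foldl_cons, List.any_cons]
    by_cases hL : pL c = true
    · have h2 := (hdis c).1 hL
      simp [hL, h2.1, h2.2, ih]
    · by_cases hS : pS c = true
      · have h2 := (hdis c).2 hS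
        simp [hL, hS, h2, ih]
      · by_cases hN : pN c = true <;>
          simp [hL, hS, hN, ih]

-- the three concrete character classes are pairwise disjoint
theorem classes_disjoint (c : Char) :
    (PySem.Chars.isIn [c] pvLETTERS = true →
       PySem.Chars.isIn [c] pvSPECIALS = false ∧ PySem.Chars.isIn [c] pvNUMBERS = false) ∧
    (PySem.Chars.isIn [c] pvSPECIALS = true → PySem.Chars.isIn [c] pvNUMBERS = false) := by
  simp only [isIn_singleton]
  constructor
  · intro h
    constructor <;> (simp only [pvLETTERS, pvSPECIALS, pvNUMBERS] at h ⊢; simp at h ⊢) <;>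
      rcases h with rfl|rfl|rfl|rfl|rfl|rfl|rfl|rfl|rfl|rfl <;> simp
  · intro h
    simp only [pvSPECIALS, pvNUMBERS] at h ⊢; simp at h ⊢
    rcases h with rfl|rfl|rfl|rfl|rfl|rfl <;> simp

-- conditional add over a list = add over the filtered list
theorem foldl_add_if' (p : String → Bool) (l : List String) (acc : List String) :
    l.foldl (fun s w => if p w then PySem.Set.add s w else s) acc
      = (l.filter p).foldl PySem.Set.add acc := by
  induction l generalizing acc with
  | nil => rfl
  | cons w ws ih =>
    by_cases h : p w <;> simp [List.foldl_cons, h, ih]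

-- A's membership condition on a word equals B's
theorem pvFlags_iff (word : String) :
    ((pvFlagsLoop word.toList).1 = true ∧ (pvFlagsLoop word.toList).2.1 = true ∧
      (pvFlagsLoop word.toList).2.2 = true)
    ↔ (word.toList.any (fun c => PySem.Chars.isIn [c] pvLETTERS) &&
       word.toList.any (fun c => PySem.Chars.isIn [c] pvSPECIALS) &&
       word.toList.any (fun c => PySem.Chars.isIn [c] pvNUMBERS)) = true := by
  unfold pvFlagsLoop
  rw [flag3_loop _ _ _ (fun c => classes_disjoint c)]
  simp [and_assoc]

-- ===== VERDICT (by name: the statement is the Claim_ definition above) =====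
theorem get_answer_set_spec : Claim_equal_get_answer_set := by
  intro all_set _
  unfold Spec_get_answer_set get_answer_set get_answer_set_alt
  rw [PySem.Set.ofList_eq_foldl, ← foldl_add_if']
  congr 1
  funext s w
  exact if_congr (pvFlags_iff w) rfl rfl
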